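-- pv_equiv track=rewrite | github.com/LuizCapistrano11/comparador-acoes | app.py | nome_amigavel
-- ===== SOURCE A (Python) =====
-- NOMES = {
--     "^BVSP": "Ibovespa",
--     "^GSPC": "S&P 500",
--     "^DJI": "Dow Jones",
--     "^IXIC": "Nasdaq",
--     "^RUT": "Russell 2000",
--     "^FTSE": "FTSE 100",
--     "^N225": "Nikkei 225",
--     "^STOXX50E": "Euro Stoxx 50",
--     "^HSI": "Hang Seng",
--     "USDBRL=X": "Dólar/Real",
--     "EURBRL=X": "Euro/Real",
--     "BTC-USD": "Bitcoin",
--     "ETH-USD": "Ethereum",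
--     "GC=F": "Ouro",
--     "CL=F": "Petróleo WTI",
--     "SI=F": "Prata",
-- }
--
-- def nome_amigavel(ticker, nome_busca=None):
--     """Retorna nome amigável para exibição."""
--     if ticker in NOMES:
--         return NOMES[ticker]
--     if nome_busca:
--         # Limpa nomes típicos do Yahoo Finance
--         nome = nome_busca
--         for sufixo in [" S.A.", " SA", " S/A", " Corp.", " Corporation",
--                        " Inc.", " Inc", " Ltd.", " Ltd", " Holdings",
--                        " Holding", " - ", " N2", " NM", " ON", " PN",
--                        " EDJ", " EJ", " DR3", " UNT"]:
--             nome = nome.split(sufixo)[0]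
--         return nome.strip()
--     # Fallback: remove .SA e limpa
--     return ticker.replace(".SA", "")
-- ===== SOURCE B (Python) =====
-- # Mapa de nomes amigáveis (mesmos pares do módulo original).
-- NOMES = dict([
--     ('^BVSP', 'Ibovespa'), ('^GSPC', 'S&P 500'), ('^DJI', 'Dow Jones'),
--     ('^IXIC', 'Nasdaq'), ('^RUT', 'Russell 2000'), ('^FTSE', 'FTSE 100'),
--     ('^N225', 'Nikkei 225'), ('^STOXX50E', 'Euro Stoxx 50'), ('^HSI', 'Hang Seng'),
--     ('USDBRL=X', 'Dólar/Real'), ('EURBRL=X', 'Euro/Real'), ('BTC-USD', 'Bitcoin'),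
--     ('ETH-USD', 'Ethereum'), ('GC=F', 'Ouro'), ('CL=F', 'Petróleo WTI'), ('SI=F', 'Prata'),
-- ])
--
-- _SUFIXOS = (
--     ' S.A.', ' SA', ' S/A', ' Corp.', ' Corporation', ' Inc.', ' Inc', ' Ltd.', ' Ltd',
--     ' Holdings', ' Holding', ' - ', ' N2', ' NM', ' ON', ' PN', ' EDJ', ' EJ', ' DR3', ' UNT',
-- )
--
--
-- def _corte(nome, sufixos, fim):
--     """Recursively narrow the cut position; fim bounds the searched prefix."""
--     if not sufixos:
--         return fim
--     p = nome.find(sufixos[0], 0, fim)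
--     return _corte(nome, sufixos[1:], fim if p == -1 else p)
--
--
-- def nome_amigavel(ticker, nome_busca=None):
--     """Retorna nome amigável para exibição."""
--     padrao = NOMES.get(ticker)
--     if padrao is not None:
--         return padrao
--     if not nome_busca:
--         return ticker.replace('.SA', '')
--     return nome_busca[:_corte(nome_busca, _SUFIXOS, len(nome_busca))].strip()
-- ===== Notes on version B (the rewrite author's own statement) =====
-- stated objective: alternative
-- what changed: The suffix-cleaning loop no longer rebuilds a new string with split at every step: a recursion over the suffix list narrows a single integer cut position (str.find with an end bound) and the string is sliced and stripped exactly once at the end.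
import Mathlib
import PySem

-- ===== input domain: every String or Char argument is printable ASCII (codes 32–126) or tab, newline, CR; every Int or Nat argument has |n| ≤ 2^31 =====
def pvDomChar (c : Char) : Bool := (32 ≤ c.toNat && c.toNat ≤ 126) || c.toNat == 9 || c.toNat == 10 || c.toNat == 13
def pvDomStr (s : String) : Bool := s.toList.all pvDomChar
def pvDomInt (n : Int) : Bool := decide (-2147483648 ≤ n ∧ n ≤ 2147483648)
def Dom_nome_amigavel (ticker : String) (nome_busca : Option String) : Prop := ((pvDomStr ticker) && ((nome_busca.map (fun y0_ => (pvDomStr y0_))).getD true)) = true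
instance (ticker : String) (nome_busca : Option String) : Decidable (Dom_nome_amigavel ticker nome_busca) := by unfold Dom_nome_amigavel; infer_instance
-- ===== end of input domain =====

-- B replaces A's per-suffix string re-splitting by a recursion that only narrows an integer
-- cut position (find with an end bound) and slices+strips once at the end: an alternative
-- decomposition with the same return value on every input.

-- shared data: the module-level dict of friendly names (same literal in both Pythons)
def NOMES : PySem.Dict String String := PySem.Dict.mk
  [("^BVSP", "Ibovespa"), ("^GSPC", "S&P 500"), ("^DJI", "Dow Jones"),
   ("^IXIC", "Nasdaq"), ("^RUT", "Russell 2000"), ("^FTSE", "FTSE 100"),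
   ("^N225", "Nikkei 225"), ("^STOXX50E", "Euro Stoxx 50"), ("^HSI", "Hang Seng"),
   ("USDBRL=X", "Dólar/Real"), ("EURBRL=X", "Euro/Real"), ("BTC-USD", "Bitcoin"),
   ("ETH-USD", "Ethereum"), ("GC=F", "Ouro"), ("CL=F", "Petróleo WTI"), ("SI=F", "Prata")]

-- ===== PORT A =====
-- `nome.split(sufixo)[0]`: split? is `some` (every sufixo literal is nonempty) and Python's
-- split never returns an empty list, so the `[0]` indexing is total (pyGetD with default).
def nome_amigavel (ticker : String) (nome_busca : Option String) : String :=
  -- `ticker in NOMES` then `NOMES[ticker]`: the lookup cannot raise under the contains guard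
  if PySem.Dict.contains NOMES ticker then (PySem.Dict.get? NOMES ticker).getD ""
  else
    match nome_busca with
    | some nb =>
      if nb ≠ "" then
        let nome := [" S.A.", " SA", " S/A", " Corp.", " Corporation",
                     " Inc.", " Inc", " Ltd.", " Ltd", " Holdings",
                     " Holding", " - ", " N2", " NM", " ON", " PN",
                     " EDJ", " EJ", " DR3", " UNT"].foldl
          (fun nome sufixo => PySem.List.pyGetD ((PySem.Str.split? nome sufixo).getD []) 0 "") nb
        PySem.Str.strip nome
      else PySem.Str.replace ticker ".SA" ""
    | none => PySem.Str.replace ticker ".SA" ""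

-- ===== PORT B =====
def SUFIXOS : List String :=
  [" S.A.", " SA", " S/A", " Corp.", " Corporation",
   " Inc.", " Inc", " Ltd.", " Ltd", " Holdings",
   " Holding", " - ", " N2", " NM", " ON", " PN",
   " EDJ", " EJ", " DR3", " UNT"]

-- Source B's _corte: `p = nome.find(sufixos[0], 0, fim)` is findFrom with an end bound
def corte (nome : String) (sufixos : List String) (fim : Int) : Int :=
  match sufixos with
  | [] => fim
  | s :: rest =>
    let p := PySem.Str.findFrom nome s 0 (some fim)
    corte nome rest (if p == -1 then fim else p)

def nome_amigavel_alt (ticker : String) (nome_busca : Option String) : String :=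
  match PySem.Dict.get? NOMES ticker with          -- padrao = NOMES.get(ticker)
  | some padrao => padrao
  | none =>
    match nome_busca with
    | none => PySem.Str.replace ticker ".SA" ""    -- `if not nome_busca`
    | some nb =>
      if nb = "" then PySem.Str.replace ticker ".SA" ""
      else PySem.Str.strip (PySem.Str.slice nb none (some (corte nb SUFIXOS (PySem.Str.len nb))))

-- ===== PRECONDITION & SPEC =====
def Spec_nome_amigavel (ticker : String) (nome_busca : Option String) (out : String) : Prop := out = nome_amigavel_alt ticker nome_busca
instance (ticker : String) (nome_busca : Option String) (out : String) : Decidable (Spec_nome_amigavel ticker nome_busca out) := by unfold Spec_nome_amigavel; infer_instance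

-- ===== CLAIM (what is proved, stated in full; the proofs are below) =====
def Claim_equal_nome_amigavel : Prop := ∀ (ticker : String) (nome_busca : Option String), Dom_nome_amigavel ticker nome_busca → Spec_nome_amigavel ticker nome_busca (nome_amigavel ticker nome_busca)

-- ===== LEMMAS AND PROOFS =====

-- length of the prefix of l strictly before the first occurrence of sep (l.length if none)
def pvTakeLen (sep : List Char) : List Char → Nat
  | [] => 0
  | c :: rest => if sep.isPrefixOf (c :: rest) then 0 else pvTakeLen sep rest + 1

theorem pvTakeLen_le (sep : List Char) : ∀ l : List Char, pvTakeLen sep l ≤ l.length := by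
  intro l
  induction l with
  | nil => simp [pvTakeLen]
  | cons c rest ih =>
    simp only [pvTakeLen, List.length_cons]
    split <;> omega

theorem pvFind_go_spec (sep : List Char) (hsep : sep ≠ []) :
    ∀ (l : List Char) (k : Nat),
      (PySem.Chars.find.go sep l k = -1 ∧ pvTakeLen sep l = l.length) ∨
      PySem.Chars.find.go sep l k = (k : Int) + (pvTakeLen sep l : Int) := by
  intro l
  induction l with
  | nil =>
    intro k
    left
    simp [PySem.Chars.find.go, pvTakeLen, List.isEmpty_iff, hsep]
  | cons c rest ih =>
    intro k
    rw [PySem.Chars.find.go.eq_def]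
    simp only [pvTakeLen]
    by_cases hp : sep.isPrefixOf (c :: rest) = true
    · right
      simp [hp]
    · rw [if_neg hp, if_neg hp]
      rcases ih (k + 1) with ⟨h1, h2⟩ | h
      · left
        refine ⟨h1, ?_⟩
        simp [h2]
      · right
        rw [h]
        push_cast
        ring

-- the accumulator of splitOn.go only prepends (reversed) finished chunks
theorem pvGo_acc (sep : List Char) :
    ∀ (fuel : Nat) (l cur : List Char) (acc : List (List Char)),
      PySem.Chars.splitOn.go sep fuel l cur acc =
        acc.reverse ++ PySem.Chars.splitOn.go sep fuel l cur [] := by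
  intro fuel
  induction fuel with
  | zero =>
    intro l cur acc
    rw [PySem.Chars.splitOn.go.eq_def, PySem.Chars.splitOn.go.eq_def]
    simp
  | succ fuel ih =>
    intro l cur acc
    cases l with
    | nil =>
      rw [PySem.Chars.splitOn.go.eq_def, PySem.Chars.splitOn.go.eq_def]
      simp
    | cons c rest =>
      rw [PySem.Chars.splitOn.go.eq_def]
      conv_rhs => rw [PySem.Chars.splitOn.go.eq_def]
      simp only []
      by_cases hp : sep.isPrefixOf (c :: rest) = true
      · simp only [hp, if_true]
        rw [ih _ _ (cur.reverse :: acc), ih _ _ [cur.reverse]]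
        simp
      · simp only [hp]
        exact ih _ _ acc

-- head of splitOn.go (empty accumulator): the prefix before the first occurrence
theorem pvGo_head (sep : List Char) :
    ∀ (fuel : Nat) (l cur : List Char), l.length < fuel →
      ∃ rest, PySem.Chars.splitOn.go sep fuel l cur [] =
        (cur.reverse ++ l.take (pvTakeLen sep l)) :: rest := by
  intro fuel
  induction fuel with
  | zero => intro l cur h; omega
  | succ fuel ih =>
    intro l cur h
    cases l with
    | nil =>
      refine ⟨[], ?_⟩
      rw [PySem.Chars.splitOn.go.eq_def]
      simp [pvTakeLen]
    | cons c rest =>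
      rw [PySem.Chars.splitOn.go.eq_def]
      simp only [pvTakeLen]
      by_cases hp : sep.isPrefixOf (c :: rest) = true
      · refine ⟨PySem.Chars.splitOn.go sep fuel (List.drop sep.length (c :: rest)) [] [], ?_⟩
        simp only [hp, if_true]
        rw [pvGo_acc sep fuel _ [] [cur.reverse]]
        simp
      · simp only [hp]
        obtain ⟨r, hr⟩ := ih rest (c :: cur) (by simp at h ⊢; omega)
        refine ⟨r, ?_⟩
        rw [hr]
        simp

theorem pvSplitOn_head (sep l : List Char) :
    ∃ rest, PySem.Chars.splitOn l sep = l.take (pvTakeLen sep l) :: rest := by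
  have := pvGo_head sep (l.length + 1) l [] (by omega)
  simpa [PySem.Chars.splitOn] using this

-- A's step: nome.split(sufixo)[0] keeps exactly the prefix before the first occurrence
theorem pvStepA (nome suf : String) (hsuf : suf.toList ≠ []) :
    (PySem.List.pyGetD ((PySem.Str.split? nome suf).getD []) 0 "").toList
      = nome.toList.take (pvTakeLen suf.toList nome.toList) := by
  obtain ⟨rest, hr⟩ := pvSplitOn_head suf.toList nome.toList
  simp [PySem.Str.split?, PySem.Chars.split?, List.isEmpty_iff, hsuf, hr,
        PySem.List.pyGetD_zero, String.toList_ofList]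

-- find = find.go with counter 0: the usable characterization of Chars.find
theorem pvFind_spec (sep : List Char) (hsep : sep ≠ []) (l : List Char) :
    (PySem.Chars.find l sep = -1 ∧ pvTakeLen sep l = l.length) ∨
    PySem.Chars.find l sep = (pvTakeLen sep l : Int) := by
  have := pvFind_go_spec sep hsep l 0
  simpa [PySem.Chars.find] using this

-- B's step: find(suf, 0, fim) with 0 ≤ fim ≤ len is find on the fim-prefix
theorem pvStepB (nb suf : String) (fim : Int) (h0 : 0 ≤ fim) (hl : fim ≤ (nb.toList.length : Int)) :
    PySem.Str.findFrom nb suf 0 (some fim) =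
      (if PySem.Chars.find (nb.toList.take fim.toNat) suf.toList = -1 then -1
       else PySem.Chars.find (nb.toList.take fim.toNat) suf.toList) := by
  have hlen : ((nb.length : Int)) = nb.toList.length := by simp
  simp only [PySem.Str.findFrom, PySem.Chars.findFrom]
  split_ifs <;> try omega
  all_goals simp_all

-- joint invariant: A's string fold equals the fim-prefix cut down by B's corte recursion
theorem pvLoop (nb : String) :
    ∀ (sufs : List String), (∀ s ∈ sufs, s.toList ≠ []) →
      ∀ (fim : Int) (nome : String), 0 ≤ fim → fim ≤ (nb.toList.length : Int) →
        nome.toList = nb.toList.take fim.toNat →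
        ((sufs.foldl
            (fun nome sufixo => PySem.List.pyGetD ((PySem.Str.split? nome sufixo).getD []) 0 "")
            nome).toList = nb.toList.take (corte nb sufs fim).toNat ∧
          0 ≤ corte nb sufs fim ∧ corte nb sufs fim ≤ fim) := by
  intro sufs
  induction sufs with
  | nil =>
    intro _ fim nome h0 hl hn
    exact ⟨hn, h0, le_refl _⟩
  | cons s rest ih =>
    intro hne fim nome h0 hl hn
    have hs : s.toList ≠ [] := hne s (List.mem_cons_self)
    have hrest : ∀ t ∈ rest, t.toList ≠ [] := fun t ht => hne t (List.mem_cons_of_mem s ht)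
    set pre := nb.toList.take fim.toNat with hpre
    have hpref : pre.length = fim.toNat := by rw [hpre, List.length_take]; omega
    have htle : pvTakeLen s.toList pre ≤ pre.length := pvTakeLen_le s.toList pre
    set t := pvTakeLen s.toList pre with htdef
    -- the new cut value, in terms of find on the current prefix
    have hcut : (if (PySem.Str.findFrom nb s 0 (some fim) == -1) = true then fim
                 else PySem.Str.findFrom nb s 0 (some fim))
        = if PySem.Chars.find pre s.toList = -1 then fim
          else (pvTakeLen s.toList pre : Int) := by
      rw [pvStepB nb s fim h0 hl, ← hpre]
      rcases pvFind_spec s.toList hs pre with ⟨hf1, _⟩ | hfe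
      · rw [hf1]; simp
      · have hf2 : PySem.Chars.find pre s.toList ≠ -1 := by rw [hfe]; omega
        simp only [if_neg hf2]
        rw [if_neg (by simp [hf2])]
        exact hfe
    -- bounds for the new cut
    have hb : 0 ≤ (if (PySem.Str.findFrom nb s 0 (some fim) == -1) = true then fim
                   else PySem.Str.findFrom nb s 0 (some fim)) ∧
              (if (PySem.Str.findFrom nb s 0 (some fim) == -1) = true then fim
               else PySem.Str.findFrom nb s 0 (some fim)) ≤ fim := by
      rw [hcut]
      split_ifs
      · exact ⟨h0, le_refl _⟩
      · omega
    -- A's fold step lands on the cut-prefix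
    have hstep : (PySem.List.pyGetD ((PySem.Str.split? nome s).getD []) 0 "").toList
        = nb.toList.take (if (PySem.Str.findFrom nb s 0 (some fim) == -1) = true then fim
                          else PySem.Str.findFrom nb s 0 (some fim)).toNat := by
      rw [pvStepA nome s hs, hn, hcut]
      split_ifs with hf1
      · rcases pvFind_spec s.toList hs pre with ⟨_, ht⟩ | hfe
        · rw [ht, List.take_length]
        · exfalso
          rw [hf1] at hfe
          omega
      · rw [Int.toNat_natCast, hpre, List.take_take]
        have h2 : pvTakeLen s.toList (List.take fim.toNat nb.toList) ≤ fim.toNat := by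
          rw [← hpre, ← htdef]
          omega
        congr 1
        omega
    simp only [List.foldl_cons, corte]
    exact ⟨(ih hrest _ _ hb.1 (le_trans hb.2 hl) hstep).1,
           (ih hrest _ _ hb.1 (le_trans hb.2 hl) hstep).2.1,
           le_trans (ih hrest _ _ hb.1 (le_trans hb.2 hl) hstep).2.2 hb.2⟩

-- ===== VERDICT (by name: the statement is the Claim_ definition above) =====
set_option maxRecDepth 4096 in
theorem nome_amigavel_spec : Claim_equal_nome_amigavel := by
  intro ticker nome_busca _
  unfold Spec_nome_amigavel nome_amigavel nome_amigavel_alt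
  cases hd : PySem.Dict.get? NOMES ticker with
  | some v =>
    rw [if_pos (by rw [PySem.Dict.contains_eq_isSome_get?, hd]; rfl)]
    rfl
  | none =>
    rw [if_neg (by rw [PySem.Dict.contains_eq_isSome_get?, hd]; simp)]
    cases nome_busca with
    | none => rfl
    | some nb =>
      by_cases hnb : nb = ""
      · simp [hnb]
      · simp only [ne_eq, hnb, not_false_eq_true, if_true, if_false]
        have hne : ∀ s ∈ SUFIXOS, s.toList ≠ [] := by
          intro s' hs'
          fin_cases hs' <;> decide
        have h := pvLoop nb SUFIXOS hne (PySem.Str.len nb) nb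
          (by rw [PySem.Str.len_eq]; positivity)
          (by rw [PySem.Str.len_eq])
          (by rw [PySem.Str.len_eq]; simp)
        have hls : ([" S.A.", " SA", " S/A", " Corp.", " Corporation",
                     " Inc.", " Inc", " Ltd.", " Ltd", " Holdings",
                     " Holding", " - ", " N2", " NM", " ON", " PN",
                     " EDJ", " EJ", " DR3", " UNT"] : List String) = SUFIXOS := rfl
        rw [hls]
        have harg : (SUFIXOS.foldl
              (fun nome sufixo => PySem.List.pyGetD ((PySem.Str.split? nome sufixo).getD []) 0 "") nb)
            = PySem.Str.slice nb none (some (corte nb SUFIXOS (PySem.Str.len nb))) := by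
          apply String.toList_inj.mp
          rw [PySem.Str.toList_slice, PySem.Chars.slice_eq_listSlice,
              PySem.List.slice_to _ h.2.1]
          exact h.1
        rw [harg]
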